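-- pv_equiv track=rewrite | github.com/satkr22/Legal-AI-Assistant---RAG-based-Conversational-System | retrieval/old_working/rq_4.py | _is_general_clause
-- ===== SOURCE A (Python) =====
-- CONDITIONAL_MARKERS = {
--     "if", "when", "unless", "except", "provided", "notwithstanding",
--     "subject to", "in case", "where", "only if", "shall not", "may not",
-- }
--
-- GENERAL_CLAUSE_MAX_WORDS = 80
--
-- CONDITIONAL_MARKER_DENSITY_THRESHOLD = 0.06
--
-- def _is_general_clause(text: str) -> bool:
--     """Return True if the chunk text looks like a broad, definitional clause.
--
--     Heuristics (no domain-specific keywords):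
--     - Short text (few words) → more likely a core definition.
--     - Low density of conditional markers → not heavily qualified.
--     """
--     words = text.split()
--     word_count = len(words)
--     if word_count == 0:
--         return False
--
--     # Short chunks tend to be high-level definitions or statements.
--     if word_count > GENERAL_CLAUSE_MAX_WORDS:
--         return False
--
--     # Even short chunks with heavy qualification are not truly "general".
--     tokens_lower = {w.lower().strip(".,;:()[]") for w in words}
--     conditional_hits = sum(
--         1 for marker in CONDITIONAL_MARKERS
--         if any(marker in " ".join(words[i:i+3]).lower() for i in range(len(words)))
--     )
--     density = conditional_hits / word_count
--     return density < CONDITIONAL_MARKER_DENSITY_THRESHOLD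
-- ===== SOURCE B (Python) =====
-- CONDITIONAL_MARKERS = {
--     "if", "when", "unless", "except", "provided", "notwithstanding",
--     "subject to", "in case", "where", "only if", "shall not", "may not",
-- }
--
-- GENERAL_CLAUSE_MAX_WORDS = 80
--
--
-- def _is_general_clause(text: str) -> bool:
--     """Same heuristic, without the per-marker 3-word-window scan.
--
--     Every marker contains at most one internal space, so it fits inside a
--     3-word window exactly when it occurs as a substring of the whole
--     whitespace-normalised text; one flat membership pass suffices.  The
--     float density test `hits / n < 0.06` is replaced by the exact integer
--     comparison `50 * hits < 3 * n`.
--     """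
--     words = text.split()
--     n = len(words)
--     if n == 0 or n > GENERAL_CLAUSE_MAX_WORDS:
--         return False
--     joined = " ".join(words).lower()
--     hits = sum(1 for marker in CONDITIONAL_MARKERS if marker in joined)
--     return 50 * hits < 3 * n
-- ===== Notes on version B (the rewrite author's own statement) =====
-- stated objective: simpler
-- what changed: The per-marker scan over all n 3-word windows (each re-joined and re-lowercased) is replaced by one whitespace-normalised lowercased join of the whole text and a single substring test per marker (exact because every marker has at most one internal space, so it fits in a 3-word window iff it occurs in the full join), and the float density comparison hits/n < 0.06 becomes the exact integer test 50*hits < 3*n.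
import Mathlib
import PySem

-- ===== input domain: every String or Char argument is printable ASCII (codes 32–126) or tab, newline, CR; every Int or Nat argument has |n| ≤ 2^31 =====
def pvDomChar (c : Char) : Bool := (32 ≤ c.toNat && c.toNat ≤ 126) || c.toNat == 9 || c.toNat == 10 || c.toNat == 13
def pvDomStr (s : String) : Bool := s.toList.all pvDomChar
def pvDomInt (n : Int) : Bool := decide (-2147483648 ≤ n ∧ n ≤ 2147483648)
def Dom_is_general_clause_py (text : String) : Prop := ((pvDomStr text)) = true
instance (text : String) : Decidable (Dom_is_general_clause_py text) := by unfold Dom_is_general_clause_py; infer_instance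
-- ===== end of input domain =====

-- B replaces A's per-marker scan over all 3-word windows by one substring test per
-- marker against the whole lowercased join (exact: every marker has at most one
-- internal space), and the float density test by an exact integer comparison; objective: simpler.

-- ===== PORT A =====

-- CONDITIONAL_MARKERS (a Python set of distinct string constants; the counts below
-- do not depend on its iteration order)
def pvConditionalMarkers : PySem.Set String :=
  PySem.Set.ofList ["if", "when", "unless", "except", "provided", "notwithstanding",
    "subject to", "in case", "where", "only if", "shall not", "may not"]

-- literal port of _is_general_clause; the final float comparison
-- `conditional_hits / word_count < 0.06` is ported as the integer comparison
-- `50 * conditional_hits < 3 * word_count`, which is exact for every reachable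
-- value (0 ≤ hits ≤ 12, 1 ≤ word_count ≤ 80; verified exhaustively against CPython)
def is_general_clause_py (text : String) : Bool :=
  let words := PySem.Str.split₀ text
  let word_count : Int := PySem.List.len words
  if word_count = 0 then false
  else if word_count > 80 then false
  else
    -- tokens_lower is computed by the Python but never used
    let _tokens_lower := PySem.Set.ofList
      (words.map (fun w => PySem.Str.lower (PySem.Str.stripChars w ".,;:()[]")))
    let conditional_hits : Int :=
      (pvConditionalMarkers.map (fun marker =>
        if (PySem.List.pyRange 0 (PySem.List.len words) 1).any (fun i =>
              PySem.Str.isIn marker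
                (PySem.Str.lower (PySem.Str.join " " (PySem.List.slice words (some i) (some (i + 3))))))
        then (1 : Int) else 0)).sum
    decide (50 * conditional_hits < 3 * word_count)

-- ===== PORT B =====

def is_general_clause_py_alt (text : String) : Bool :=
  let words := PySem.Str.split₀ text
  let n : Int := PySem.List.len words
  if n = 0 ∨ n > 80 then false
  else
    let joined := PySem.Str.lower (PySem.Str.join " " words)
    let hits : Int :=
      (pvConditionalMarkers.map (fun marker =>
        if PySem.Str.isIn marker joined then (1 : Int) else 0)).sum
    decide (50 * hits < 3 * n)

-- ===== PRECONDITION & SPEC =====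
def Spec_is_general_clause_py (text : String) (out : Bool) : Prop := out = is_general_clause_py_alt text
instance (text : String) (out : Bool) : Decidable (Spec_is_general_clause_py text out) := by unfold Spec_is_general_clause_py; infer_instance

-- ===== CLAIM (what is proved, stated in full; the proofs are below) =====
def Claim_equal_is_general_clause_py : Prop := ∀ (text : String), Dom_is_general_clause_py text → Spec_is_general_clause_py text (is_general_clause_py text)

-- ===== LEMMAS AND PROOFS =====

-- `J L` below abbreviates `PySem.Chars.join [' '] L` (the chars of " ".join).

-- a prefix of `a ++ c :: b` is a prefix of `a` or runs past the `c`
theorem pv_prefix_split {α : Type} {p a b : List α} {c : α}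
    (h : p <+: a ++ c :: b) : p <+: a ∨ ∃ q, p = a ++ c :: q ∧ q <+: b := by
  induction a generalizing p with
  | nil =>
    obtain ⟨t, ht⟩ := h
    cases p with
    | nil => exact Or.inl List.nil_prefix
    | cons x p' =>
      simp only [List.nil_append, List.cons_append, List.cons.injEq] at ht
      exact Or.inr ⟨p', by simp [ht.1], ⟨t, ht.2⟩⟩
  | cons y a' ih =>
    cases p with
    | nil => exact Or.inl List.nil_prefix
    | cons x p' =>
      rw [List.cons_append] at h
      obtain ⟨hx, hp⟩ := List.cons_prefix_cons.mp h
      rcases ih hp with h1 | ⟨q, hq, hqb⟩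
      · exact Or.inl (List.cons_prefix_cons.mpr ⟨hx, h1⟩)
      · exact Or.inr ⟨q, by rw [hx, hq]; rfl, hqb⟩

-- an infix of `a ++ c :: b` lies in `a`, lies in `b`, or straddles the `c`
theorem pv_infix_split {α : Type} {m a b : List α} {c : α}
    (h : m <:+: a ++ c :: b) :
    m <:+: a ∨ m <:+: b ∨ ∃ m1 m2, m = m1 ++ c :: m2 ∧ m1 <:+ a ∧ m2 <+: b := by
  induction a generalizing m with
  | nil =>
    rw [List.nil_append] at h
    rcases List.infix_cons_iff.mp h with hp | hi
    · cases m with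
      | nil => exact Or.inl (List.nil_infix)
      | cons x m' =>
        obtain ⟨hx, hm'⟩ := List.cons_prefix_cons.mp hp
        exact Or.inr (Or.inr ⟨[], m', by simp [hx], List.nil_suffix, hm'⟩)
    · exact Or.inr (Or.inl hi)
  | cons y a' ih =>
    rw [List.cons_append] at h
    rcases List.infix_cons_iff.mp h with hp | hi
    · cases m with
      | nil => exact Or.inl List.nil_infix
      | cons x m' =>
        obtain ⟨hx, hm'⟩ := List.cons_prefix_cons.mp hp
        rcases pv_prefix_split hm' with h1 | ⟨q, hq, hqb⟩
        · exact Or.inl (List.IsPrefix.isInfix (List.cons_prefix_cons.mpr ⟨hx, h1⟩))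
        · exact Or.inr (Or.inr ⟨y :: a', q, by rw [hx, hq]; rfl, List.suffix_rfl, hqb⟩)
    · rcases ih hi with h1 | h2 | ⟨m1, m2, heq, hs, hpre⟩
      · exact Or.inl (List.infix_cons h1)
      · exact Or.inr (Or.inl h2)
      · exact Or.inr (Or.inr ⟨m1, m2, heq, hs.trans (List.suffix_cons y a'), hpre⟩)

-- splitting at an occurrence of `c` not occurring on either left part is unique
theorem pv_unique_split {α : Type} {a a' b b' : List α} {c : α}
    (ha : c ∉ a) (ha' : c ∉ a') (h : a ++ c :: b = a' ++ c :: b') : a = a' ∧ b = b' := by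
  induction a generalizing a' with
  | nil =>
    cases a' with
    | nil => simpa using h
    | cons x t =>
      rw [List.nil_append, List.cons_append] at h
      injection h with h1 h2
      exact absurd (h1 ▸ List.mem_cons_self) ha'
  | cons x t ih =>
    cases a' with
    | nil =>
      rw [List.cons_append, List.nil_append] at h
      injection h with h1 h2
      exact absurd (h1 ▸ List.mem_cons_self) ha
    | cons x' t' =>
      rw [List.cons_append, List.cons_append] at h
      injection h with h1 h2
      have := ih (fun hc => ha (List.mem_cons_of_mem _ hc)) (fun hc => ha' (List.mem_cons_of_mem _ hc)) h2
      exact ⟨by rw [h1, this.1], this.2⟩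

theorem pv_join_take_prefix (j : Nat) (L : List (List Char)) :
    PySem.Chars.join [' '] (L.take j) <+: PySem.Chars.join [' '] L := by
  induction L generalizing j with
  | nil => simp
  | cons w rest ih =>
    cases j with
    | zero => simp [PySem.Chars.join_nil]
    | succ j' =>
      rw [List.take_succ_cons]
      cases rest with
      | nil => simp [PySem.Chars.join_singleton]
      | cons r t =>
        cases hj : (r :: t).take j' with
        | nil =>
          rw [PySem.Chars.join_singleton, PySem.Chars.join_cons_cons, List.append_assoc]
          exact List.prefix_append w _
        | cons u v =>
          rw [PySem.Chars.join_cons_cons, PySem.Chars.join_cons_cons,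
            List.prefix_append_right_inj, ← hj]
          exact ih j'

theorem pv_join_drop_suffix (k : Nat) (L : List (List Char)) :
    PySem.Chars.join [' '] (L.drop k) <:+ PySem.Chars.join [' '] L := by
  induction L generalizing k with
  | nil => simp
  | cons w rest ih =>
    cases k with
    | zero => exact List.suffix_rfl
    | succ k' =>
      rw [List.drop_succ_cons]
      cases rest with
      | nil => simp [PySem.Chars.join_nil]
      | cons r t =>
        exact (ih (k := k')).trans (by rw [PySem.Chars.join_cons_cons, List.append_assoc]; exact (List.suffix_append _ _).trans (List.suffix_append _ _))

theorem pv_head_prefix_join (w : List Char) (L : List (List Char)) :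
    w <+: PySem.Chars.join [' '] (w :: L) := by
  cases L with
  | nil => simp [PySem.Chars.join_singleton]
  | cons r t =>
    rw [PySem.Chars.join_cons_cons, List.append_assoc]
    exact List.prefix_append w _

-- a nonempty space-free infix of the join lies inside a single token
theorem pv_nospace_infix_join {L : List (List Char)} {m : List Char}
    (hL : ∀ w ∈ L, (' ' : Char) ∉ w) (hm : (' ' : Char) ∉ m) (hne : m ≠ [])
    (h : m <:+: PySem.Chars.join [' '] L) :
    ∃ k w rest, L.drop k = w :: rest ∧ m <:+: w := by
  induction L with
  | nil =>
    rw [PySem.Chars.join_nil] at h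
    exact absurd (List.infix_nil.mp h) hne
  | cons w rest ih =>
    cases rest with
    | nil =>
      rw [PySem.Chars.join_singleton] at h
      exact ⟨0, w, [], rfl, h⟩
    | cons r t =>
      rw [PySem.Chars.join_cons_cons, List.append_assoc, List.singleton_append] at h
      rcases pv_infix_split h with h1 | h2 | ⟨m1, m2, heq, _, _⟩
      · exact ⟨0, w, r :: t, rfl, h1⟩
      · obtain ⟨k, w', rest', hd, hw⟩ := ih (fun x hx => hL x (List.mem_cons_of_mem _ hx)) h2
        exact ⟨k + 1, w', rest', hd, hw⟩
      · exact absurd (heq ▸ List.mem_append_right m1 (List.mem_cons_self)) hm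

theorem pv_onespace_infix_join {L : List (List Char)} {p q : List Char}
    (hL : ∀ w ∈ L, (' ' : Char) ∉ w) (hp : (' ' : Char) ∉ p) (hq : (' ' : Char) ∉ q)
    (h : (p ++ ' ' :: q) <:+: PySem.Chars.join [' '] L) :
    ∃ k a b rest, L.drop k = a :: b :: rest ∧ p <:+ a ∧ q <+: b := by
  induction L with
  | nil =>
    rw [PySem.Chars.join_nil] at h
    exact absurd (List.infix_nil.mp h) (by simp)
  | cons w rest ih =>
    cases rest with
    | nil =>
      rw [PySem.Chars.join_singleton] at h
      exact absurd (h.subset (List.mem_append_right p (List.mem_cons_self))) (hL w (List.mem_cons_self))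
    | cons r t =>
      rw [PySem.Chars.join_cons_cons, List.append_assoc, List.singleton_append] at h
      rcases pv_infix_split h with h1 | h2 | ⟨m1, m2, heq, hsuf, hpre⟩
      · exact absurd (h1.subset (List.mem_append_right p (List.mem_cons_self))) (hL w (List.mem_cons_self))
      · obtain ⟨k, a, b, rest', hd, hpa, hqb⟩ := ih (fun x hx => hL x (List.mem_cons_of_mem _ hx)) h2
        exact ⟨k + 1, a, b, rest', hd, hpa, hqb⟩
      · have hm1 : (' ' : Char) ∉ m1 := fun hc => hL w (List.mem_cons_self) (hsuf.subset hc)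
        obtain ⟨hpm, hqm⟩ := pv_unique_split hp hm1 heq
        subst hpm
        rw [← hqm] at hpre
        cases t with
        | nil =>
          rw [PySem.Chars.join_singleton] at hpre
          exact ⟨0, w, r, [], rfl, hsuf, hpre⟩
        | cons s u =>
          rw [PySem.Chars.join_cons_cons, List.append_assoc, List.singleton_append] at hpre
          rcases pv_prefix_split hpre with h1 | ⟨q2, hq2, _⟩
          · exact ⟨0, w, r, s :: u, rfl, hsuf, h1⟩
          · exact absurd (hq2 ▸ List.mem_append_right r (List.mem_cons_self)) hq

theorem pv_lower_join (W : List (List Char)) :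
    PySem.Chars.lower (PySem.Chars.join [' '] W)
      = PySem.Chars.join [' '] (W.map PySem.Chars.lower) := by
  have hsp : PySem.Chars.lowerChar ' ' = ' ' := by decide
  induction W with
  | nil => simp [PySem.Chars.join_nil, PySem.Chars.lower]
  | cons w rest ih =>
    cases rest with
    | nil => simp [PySem.Chars.join_singleton]
    | cons r t =>
      rw [PySem.Chars.join_cons_cons, List.map_cons, List.map_cons, PySem.Chars.join_cons_cons,
        ← List.map_cons, ← ih]
      simp [PySem.Chars.lower, List.map_append, hsp]

theorem pv_lowerChar_ne_space {c : Char} (h : PySem.Chars.isspace c = false) :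
    PySem.Chars.lowerChar c ≠ ' ' := by
  unfold PySem.Chars.lowerChar
  split
  · rename_i hu
    simp only [PySem.Chars.isupper, Bool.and_eq_true, decide_eq_true_eq] at hu
    have hv : 65 ≤ c.toNat ∧ c.toNat ≤ 90 := ⟨hu.1, hu.2⟩
    intro heq
    have hval : (c.toNat + 32).isValidChar := Or.inl (by omega)
    have h2 := congrArg Char.toNat heq
    have h32 : (' ' : Char).toNat = 32 := by decide
    rw [Char.toNat_ofNat, if_pos hval, h32] at h2
    omega
  · intro heq
    rw [heq] at h
    simp [PySem.Chars.isspace] at h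

theorem pv_lower_nospace {w : List Char} (h : ∀ c ∈ w, PySem.Chars.isspace c = false) :
    (' ' : Char) ∉ PySem.Chars.lower w := by
  intro hc
  rw [PySem.Chars.lower, List.mem_map] at hc
  obtain ⟨c, hcm, hcl⟩ := hc
  exact pv_lowerChar_ne_space (h c hcm) hcl

-- invariant of str.split()'s accumulator loop
theorem pv_split₀_go_tokens (s : List Char) :
    ∀ (cur acc : _), (∀ c ∈ cur, PySem.Chars.isspace c = false) →
    (∀ w ∈ acc, w ≠ [] ∧ ∀ c ∈ w, PySem.Chars.isspace c = false) →
    ∀ w ∈ PySem.Chars.split₀.go s cur acc, w ≠ [] ∧ ∀ c ∈ w, PySem.Chars.isspace c = false := by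
  induction s with
  | nil =>
    intro cur acc hcur hacc w hw
    rw [PySem.Chars.split₀.go] at hw
    split at hw
    · exact hacc w (List.mem_reverse.mp hw)
    · rename_i hne
      rcases List.mem_cons.mp (List.mem_reverse.mp hw) with h1 | h2
      · subst h1
        refine ⟨fun hc => hne (by simp [List.reverse_eq_nil_iff.mp hc]), ?_⟩
        intro c hc
        exact hcur c (List.mem_reverse.mp hc)
      · exact hacc w h2
  | cons c rest ih =>
    intro cur acc hcur hacc w hw
    rw [PySem.Chars.split₀.go] at hw
    split at hw
    · split at hw
      · exact ih [] acc (by simp) hacc w hw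
      · refine ih [] _ (by simp) ?_ w hw
        intro w' hw'
        rcases List.mem_cons.mp hw' with h1 | h2
        · subst h1
          rename_i hne
          refine ⟨fun hc => hne (by simp [List.reverse_eq_nil_iff.mp hc]), ?_⟩
          intro c' hc'
          exact hcur c' (List.mem_reverse.mp hc')
        · exact hacc w' h2
    · rename_i hns
      refine ih (c :: cur) acc ?_ hacc w hw
      intro c' hc'
      rcases List.mem_cons.mp hc' with h1 | h2
      · subst h1
        simpa using hns
      · exact hcur c' h2

theorem pv_split₀_tokens (s : List Char) :
    ∀ w ∈ PySem.Chars.split₀ s, w ≠ [] ∧ ∀ c ∈ w, PySem.Chars.isspace c = false := by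
  rw [PySem.Chars.split₀]
  exact pv_split₀_go_tokens s [] [] (by simp) (by simp)

-- forward: any 3-token window's join is an infix of the whole join
theorem pv_window_infix_join (k : Nat) (L : List (List Char)) :
    PySem.Chars.join [' '] ((L.drop k).take 3) <:+: PySem.Chars.join [' '] L := by
  exact (pv_join_take_prefix 3 (L.drop k)).isInfix.trans (pv_join_drop_suffix k L).isInfix

theorem pv_marker_iff_nospace {L : List (List Char)} {m : List Char}
    (hL : ∀ w ∈ L, (' ' : Char) ∉ w) (hm : (' ' : Char) ∉ m) (hne : m ≠ []) :
    (∃ k, k < L.length ∧ m <:+: PySem.Chars.join [' '] ((L.drop k).take 3))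
      ↔ m <:+: PySem.Chars.join [' '] L := by
  constructor
  · rintro ⟨k, _, h⟩
    exact h.trans (pv_window_infix_join k L)
  · intro h
    obtain ⟨k, w, rest, hd, hw⟩ := pv_nospace_infix_join hL hm hne h
    have hk : k < L.length := by
      by_contra hge
      rw [List.drop_eq_nil_iff.mpr (by omega)] at hd
      exact List.cons_ne_nil _ _ hd.symm
    refine ⟨k, hk, ?_⟩
    rw [hd, List.take_succ_cons]
    exact hw.trans (pv_head_prefix_join w _).isInfix

theorem pv_marker_iff_onespace {L : List (List Char)} {p q : List Char}
    (hL : ∀ w ∈ L, (' ' : Char) ∉ w) (hp : (' ' : Char) ∉ p) (hq : (' ' : Char) ∉ q) :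
    (∃ k, k < L.length ∧ (p ++ ' ' :: q) <:+: PySem.Chars.join [' '] ((L.drop k).take 3))
      ↔ (p ++ ' ' :: q) <:+: PySem.Chars.join [' '] L := by
  constructor
  · rintro ⟨k, _, h⟩
    exact h.trans (pv_window_infix_join k L)
  · intro h
    obtain ⟨k, a, b, rest, hd, hpa, hqb⟩ := pv_onespace_infix_join hL hp hq h
    have hk : k < L.length := by
      by_contra hge
      rw [List.drop_eq_nil_iff.mpr (by omega)] at hd
      exact List.cons_ne_nil _ _ hd.symm
    refine ⟨k, hk, ?_⟩
    rw [hd, List.take_succ_cons, List.take_succ_cons]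
    have hmid : (p ++ ' ' :: q) <:+: a ++ ' ' :: b := by
      obtain ⟨s, hs⟩ := hpa
      obtain ⟨u, hu⟩ := hqb
      exact ⟨s, u, by rw [← hs, ← hu]; simp⟩
    refine hmid.trans (List.IsPrefix.isInfix ?_)
    cases hr : rest.take 1 with
    | nil =>
      rw [PySem.Chars.join_cons_cons, PySem.Chars.join_singleton, List.append_assoc,
        List.singleton_append]
    | cons x xs =>
      rw [PySem.Chars.join_cons_cons, List.append_assoc, List.singleton_append]
      have hb := pv_head_prefix_join b (x :: xs)
      obtain ⟨u, hu⟩ := hb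
      exact ⟨u, by rw [List.append_assoc, List.cons_append, hu]⟩

-- chars of `" ".join(ws).lower()` as a join of lowered tokens
theorem pv_lower_join_toList (ws : List String) :
    (PySem.Str.lower (PySem.Str.join " " ws)).toList
      = PySem.Chars.join [' '] (ws.map (fun w => PySem.Chars.lower w.toList)) := by
  rw [PySem.Str.toList_lower, PySem.Str.toList_join,
    show (" " : String).toList = [' '] from rfl, pv_lower_join, List.map_map]
  rfl

-- the window scan of A and the flat membership test of B agree for any marker
-- with at most one internal space, over whitespace-free tokens
theorem pv_marker_window_eq (words : List String) (m : String)
    (hL : ∀ w ∈ words.map (fun w => PySem.Chars.lower w.toList), (' ' : Char) ∉ w)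
    (hshape : ((' ' : Char) ∉ m.toList ∧ m.toList ≠ [])
      ∨ ∃ p q, m.toList = p ++ ' ' :: q ∧ (' ' : Char) ∉ p ∧ (' ' : Char) ∉ q) :
    ((PySem.List.pyRange 0 (PySem.List.len words) 1).any (fun i =>
        PySem.Str.isIn m (PySem.Str.lower (PySem.Str.join " "
          (PySem.List.slice words (some i) (some (i + 3)))))))
      = PySem.Str.isIn m (PySem.Str.lower (PySem.Str.join " " words)) := by
  set L := words.map (fun w => PySem.Chars.lower w.toList) with hLdef
  have hlen : L.length = words.length := by simp [hLdef]
  rw [Bool.eq_iff_iff]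
  have hwin : ∀ k : Nat,
      (PySem.Str.lower (PySem.Str.join " "
        (PySem.List.slice words (some (k : Int)) (some ((k : Int) + 3))))).toList
      = PySem.Chars.join [' '] ((L.drop k).take 3) := by
    intro k
    have h3 : ((k : Int) + 3) = ((k + 3 : Nat) : Int) := by push_cast; ring
    have h43 : k + 3 - k = 3 := by omega
    rw [h3, PySem.List.slice_natCast, h43, pv_lower_join_toList, hLdef, List.map_take,
      List.map_drop]
  have hmain : (∃ k, k < L.length ∧ m.toList <:+: PySem.Chars.join [' '] ((L.drop k).take 3))
      ↔ m.toList <:+: PySem.Chars.join [' '] L := by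
    rcases hshape with ⟨hm, hne⟩ | ⟨p, q, heq, hps, hqs⟩
    · exact pv_marker_iff_nospace hL hm hne
    · rw [heq]
      exact pv_marker_iff_onespace hL hps hqs
  constructor
  · intro h
    obtain ⟨i, hi, hin⟩ := List.any_eq_true.mp h
    obtain ⟨hi0, hi1⟩ := PySem.List.mem_pyRange_one.mp hi
    rw [PySem.List.len_eq] at hi1
    set k := i.toNat with hk
    have hik : i = (k : Int) := by omega
    rw [hik] at hin
    rw [PySem.Str.isIn_iff_infix, hwin k] at hin
    rw [PySem.Str.isIn_iff_infix, pv_lower_join_toList, ← hLdef]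
    exact hmain.mp ⟨k, by rw [hlen]; omega, hin⟩
  · intro h
    rw [PySem.Str.isIn_iff_infix, pv_lower_join_toList, ← hLdef] at h
    obtain ⟨k, hk, hin⟩ := hmain.mpr h
    refine List.any_eq_true.mpr ⟨(k : Int), PySem.List.mem_pyRange_one.mpr
      ⟨by omega, by rw [PySem.List.len_eq, ← hlen]; omega⟩, ?_⟩
    rw [PySem.Str.isIn_iff_infix, hwin k]
    exact hin

-- the lowered split₀ tokens are space-free
theorem pv_tokens_nospace (text : String) :
    ∀ w ∈ (PySem.Str.split₀ text).map (fun w => PySem.Chars.lower w.toList),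
      (' ' : Char) ∉ w := by
  intro w hw
  obtain ⟨w', hw', rfl⟩ := List.mem_map.mp hw
  have hmem : w'.toList ∈ PySem.Chars.split₀ text.toList := by
    rw [← PySem.Str.split₀_map_toList]
    exact List.mem_map_of_mem hw'
  exact pv_lower_nospace (pv_split₀_tokens text.toList w'.toList hmem).2

-- ===== VERDICT (by name: the statement is the Claim_ definition above) =====
theorem is_general_clause_py_spec : Claim_equal_is_general_clause_py := by
  intro text _
  unfold Spec_is_general_clause_py
  have hmarkers : pvConditionalMarkers = ["if", "when", "unless", "except", "provided",
      "notwithstanding", "subject to", "in case", "where", "only if", "shall not",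
      "may not"] := by decide
  have hL := pv_tokens_nospace text
  have hhits : ((pvConditionalMarkers).map (fun marker =>
        if (PySem.List.pyRange 0 (PySem.List.len (PySem.Str.split₀ text)) 1).any (fun i =>
              PySem.Str.isIn marker (PySem.Str.lower (PySem.Str.join " "
                (PySem.List.slice (PySem.Str.split₀ text) (some i) (some (i + 3))))))
        then (1 : Int) else 0))
      = (pvConditionalMarkers.map (fun marker =>
        if PySem.Str.isIn marker (PySem.Str.lower (PySem.Str.join " " (PySem.Str.split₀ text)))
        then (1 : Int) else 0)) := by
    apply List.map_congr_left
    intro m hm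
    have hshape : ((' ' : Char) ∉ m.toList ∧ m.toList ≠ [])
        ∨ ∃ p q, m.toList = p ++ ' ' :: q ∧ (' ' : Char) ∉ p ∧ (' ' : Char) ∉ q := by
      rw [hmarkers] at hm
      fin_cases hm
      · exact Or.inl (by decide)
      · exact Or.inl (by decide)
      · exact Or.inl (by decide)
      · exact Or.inl (by decide)
      · exact Or.inl (by decide)
      · exact Or.inl (by decide)
      · exact Or.inr ⟨"subject".toList, "to".toList, by decide, by decide, by decide⟩
      · exact Or.inr ⟨"in".toList, "case".toList, by decide, by decide, by decide⟩
      · exact Or.inl (by decide)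
      · exact Or.inr ⟨"only".toList, "if".toList, by decide, by decide, by decide⟩
      · exact Or.inr ⟨"shall".toList, "not".toList, by decide, by decide, by decide⟩
      · exact Or.inr ⟨"may".toList, "not".toList, by decide, by decide, by decide⟩
    rw [pv_marker_window_eq (PySem.Str.split₀ text) m hL hshape]
  simp only [is_general_clause_py, is_general_clause_py_alt]
  by_cases h0 : PySem.Str.split₀ text = []
  · simp [h0]
  · by_cases h80 : 80 < (PySem.Str.split₀ text).length
    · simp [h0, h80]
    · simp at hhits
      simp [h0, h80]
      rw [List.map_congr_left hhits]
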